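-- pv_equiv track=rewrite | github.com/heyese/hackerrank | Waiter.py | waiter
-- ===== SOURCE A (Python) =====
-- import collections
-- import math
--
-- def primes():
--
--     yield 2
--     primes = [2]
--     num = 3
--     while True:
--         num_prime = True
--         for p in primes:
--             if p > math.sqrt(num):
--                 break
--             if not num % p:
--                 num_prime = False
--         if num_prime:
--             primes.append(num)
--             yield num
--         num += 2
--
-- def waiter(numbers, q):
--     prime_gen = primes()
--     plate_stacks = collections.defaultdict(list)
--     current_plates = collections.deque(numbers)
--     next_plates = collections.deque()
--
--     for i in range(q):
--         p = next(prime_gen)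
--         next_plates.clear()
--         while True:
--             try:
--                 plate = current_plates.pop()
--             except IndexError:
--                 break
--
--             if plate % p:
--                 next_plates.append(plate)
--             else:
--                 plate_stacks[i].append(plate)
--
--         current_plates = next_plates.copy()
--
--     results = []
--     for i in range(q):
--         results += reversed(plate_stacks[i])
--     results += reversed(next_plates)
--     return results
-- ===== SOURCE B (Python) =====
-- import collections
-- import math
--
-- def primes():
--
--     yield 2
--     primes = [2]
--     num = 3
--     while True:
--         num_prime = True
--         for p in primes:
--             if p > math.sqrt(num):
--                 break
--             if not num % p:
--                 num_prime = False
--         if num_prime: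
--             primes.append(num)
--             yield num
--         num += 2
--
-- def waiter(numbers, q):
--     prime_gen = primes()
--     ps = [next(prime_gen) for _ in range(q)]
--
--     def key(x):
--         # index of the first listed prime dividing x; len(ps) if none does
--         for i, p in enumerate(ps):
--             if x % p == 0:
--                 return i
--         return len(ps)
--
--     buckets = collections.defaultdict(list)
--     for x in numbers:
--         buckets[key(x)].append(x)
--
--     out = []
--     for i in range(q):
--         stack = buckets[i]
--         out += stack if i % 2 == 0 else stack[::-1]
--     left = buckets[len(ps)]
--     out += left if len(ps) % 2 == 1 else left[::-1]
--     return out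
-- ===== Notes on version B (the rewrite author's own statement) =====
-- stated objective: alternative
-- what changed: Replaces A's q destructive deque sweeps (each round popping every remaining plate off a deque, reversing the pile) by generating the q primes once, classifying each plate in a single pass into buckets by the first prime that divides it, and emitting each bucket with a parity-based reversal.
-- intended difference: For q = 0 with plates present A returns [] because its last line reads next_plates (never populated when the loop body does not run) instead of current_plates; B returns the untouched pile reversed(numbers), the value A's own assembly gives once it reads the right deque. — e.g. on waiter([1, 2, 3], 0): A returns [], B returns [3, 2, 1]
-- outside the precondition, e.g. on waiter([2, 3], -1): A returns [], B returns [3, 2]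
import Mathlib
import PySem

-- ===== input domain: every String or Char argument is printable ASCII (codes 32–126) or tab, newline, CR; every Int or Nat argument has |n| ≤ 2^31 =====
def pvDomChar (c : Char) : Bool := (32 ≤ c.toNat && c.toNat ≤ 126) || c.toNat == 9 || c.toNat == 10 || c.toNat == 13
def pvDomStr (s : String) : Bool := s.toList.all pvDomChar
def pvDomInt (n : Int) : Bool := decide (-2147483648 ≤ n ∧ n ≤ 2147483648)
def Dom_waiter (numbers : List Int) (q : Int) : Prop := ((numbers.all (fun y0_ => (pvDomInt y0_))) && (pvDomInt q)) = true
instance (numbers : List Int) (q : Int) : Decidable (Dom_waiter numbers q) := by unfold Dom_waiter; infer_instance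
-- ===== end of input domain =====

-- B replaces A's q deque sweeps (each reversing the remaining plates) by one prime list, a single
-- classifying pass over the plates into buckets, and parity-based emission of each bucket.
-- The prime generator helper is kept verbatim from the module (both versions draw the same primes).

-- ===== SHARED HELPER: the primes() generator (used by both ports) =====
-- inner 'for p in primes:' trial-division loop; 'p > math.sqrt(num)' is exactly 'p * p > num'
-- on this integer domain (num < 2^53, where the float sqrt comparison agrees with the integer one)
def primesTestLoop : List Int → Int → Bool → Bool
  | [], _, flag => flag
  | p :: rest, num, flag =>
    if p * p > num then flag
    else primesTestLoop rest num (if PySem.Int.mod num p == 0 then false else flag)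

-- 'while True: … num += 2' search for the next prime; fuel makes it total (the fallback arm is
-- never reached for any fuel ≥ the distance to the next prime, and the fuel passed below is ample)
def primesSearch : List Int → Int → Nat → Int × List Int × Int
  | ps, num, 0 => (num, ps ++ [num], num + 2)
  | ps, num, fuel + 1 =>
    if primesTestLoop ps num true then (num, ps ++ [num], num + 2)
    else primesSearch ps (num + 2) fuel

-- one next(prime_gen): state ([], _) = generator not started (first yield is 2, then primes=[2], num=3)
def primesNext : List Int → Int → Int × List Int × Int
  | [], _ => (2, [2], 3)
  | p :: ps, num => primesSearch (p :: ps) num (num.toNat + 2)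

-- the first k values of the generator from a given state (B's 'ps = [next(prime_gen) for _ in range(q)]')
def takePrimes : Nat → List Int → Int → List Int
  | 0, _, _ => []
  | k + 1, ps, num =>
    let t := primesNext ps num
    t.1 :: takePrimes k t.2.1 t.2.2

-- ===== PORT A =====
-- one 'while True: plate = current_plates.pop()' sweep: popping from the right end of the deque
-- is a left fold over the reversed list; deque.append is list append
def sweepA (p : Int) (cur : List Int) : List Int × List Int :=
  cur.reverse.foldl
    (fun acc plate =>
      if PySem.Int.mod plate p != 0 then (acc.1 ++ [plate], acc.2)
      else (acc.1, acc.2 ++ [plate]))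
    ([], [])

-- 'for i in range(q):' — returns (the stacks plate_stacks[0..q-1] in order, the final current_plates)
def roundsA : List Int → Int → Nat → List Int → List (List Int) × List Int
  | _, _, 0, cur => ([], cur)
  | ps, num, k + 1, cur =>
    let t := primesNext ps num
    let s := sweepA t.1 cur
    let r := roundsA t.2.1 t.2.2 k s.1
    (s.2 :: r.1, r.2)

def waiter (numbers : List Int) (q : Int) : List Int :=
  let k := q.toNat                      -- range(q) runs q times (0 times for q ≤ 0)
  let r := roundsA [] 3 k numbers
  let base := r.1.foldl (fun res s => res ++ s.reverse) []
  -- A's last line reads next_plates, which is still the initial empty deque when the loop never ran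
  base ++ (if k = 0 then ([] : List Int) else r.2).reverse

-- ===== PORT B =====
-- key(x): index of the first listed prime dividing x (the running counter i plays enumerate's role),
-- falling off the end returns len(ps)
def keyLoop : List Int → Int → Int → Int
  | [], _, i => i
  | p :: rest, x, i => if PySem.Int.mod x p == 0 then i else keyLoop rest x (i + 1)

def waiter_alt (numbers : List Int) (q : Int) : List Int :=
  let ps := takePrimes q.toNat [] 3
  -- defaultdict(list) with buckets[key(x)].append(x)
  let buckets := numbers.foldl
    (fun d x => PySem.Dict.modify d (keyLoop ps x 0) [] (fun l => l ++ [x]))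
    (PySem.Dict.empty : PySem.Dict Int (List Int))
  let out := (PySem.List.pyRange 0 q 1).foldl
    (fun res i =>
      let stack := PySem.Dict.getD buckets i []
      res ++ (if PySem.Int.mod i 2 == 0 then stack else stack.reverse))
    []
  let left := PySem.Dict.getD buckets (ps.length : Int) []
  out ++ (if PySem.Int.mod (ps.length : Int) 2 == 1 then left else left.reverse)

-- ===== PRECONDITION & SPEC =====
-- Pre_ restricts to the natural domain: a negative number of sieving rounds is meaningless
-- (A accidentally returns [] there, B returns the untouched pile).
def Pre_waiter (numbers : List Int) (q : Int) : Prop := 0 ≤ q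
instance (numbers : List Int) (q : Int) : Decidable (Pre_waiter numbers q) := by unfold Pre_waiter; infer_instance
def pvWitness_waiter : List Int × Int := ([2, 3, 4, 5, 6, 7], 2)

-- For q = 0 with plates present A returns [] because its last line reads next_plates (never
-- populated when the loop body does not run) instead of current_plates; B returns the untouched
-- pile reversed(numbers) — the value A's own assembly gives once it reads the right deque.
def D_waiter (numbers : List Int) (q : Int) : Prop := q = 0 ∧ numbers ≠ []
instance (numbers : List Int) (q : Int) : Decidable (D_waiter numbers q) := by unfold D_waiter; infer_instance

def Spec_waiter (numbers : List Int) (q : Int) (out : List Int) : Prop := ¬ D_waiter numbers q → out = waiter_alt numbers q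
instance (numbers : List Int) (q : Int) (out : List Int) : Decidable (Spec_waiter numbers q out) := by unfold Spec_waiter; infer_instance

def pvDiffWitness_waiter : List Int × Int := ([1, 2, 3], 0)
def pvDiffWitnessOut_waiter : (List Int) × (List Int) := ([], [3, 2, 1])

-- ===== CLAIM (what is proved, stated in full; the proofs are below) =====
def Claim_unchanged_waiter : Prop := ∀ (numbers : List Int) (q : Int), Dom_waiter numbers q → Pre_waiter numbers q → Spec_waiter numbers q (waiter numbers q)
def Claim_changed_waiter : Prop := Dom_waiter (pvDiffWitness_waiter.1) (pvDiffWitness_waiter.2) ∧ Pre_waiter (pvDiffWitness_waiter.1) (pvDiffWitness_waiter.2) ∧ D_waiter (pvDiffWitness_waiter.1) (pvDiffWitness_waiter.2) ∧ waiter (pvDiffWitness_waiter.1) (pvDiffWitness_waiter.2) = pvDiffWitnessOut_waiter.1 ∧ waiter_alt (pvDiffWitness_waiter.1) (pvDiffWitness_waiter.2) = pvDiffWitnessOut_waiter.2 ∧ pvDiffWitnessOut_waiter.1 ≠ pvDiffWitnessOut_waiter.2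
def Claim_exact_waiter : Prop := ∀ (numbers : List Int) (q : Int), Dom_waiter numbers q → Pre_waiter numbers q → D_waiter numbers q → waiter numbers q ≠ waiter_alt numbers q

-- ===== LEMMAS AND PROOFS =====

-- the common normal form both programs compute (for q ≥ 1 rounds; B also for q = 0):
-- emit the plates the next prime catches, in current order, then recurse on the reversed rest
def specOut : List Int → List Int → List Int
  | [], cur => cur.reverse
  | p :: rest, cur =>
      cur.filter (fun x => PySem.Int.mod x p == 0) ++
        specOut rest ((cur.filter (fun x => !(PySem.Int.mod x p == 0))).reverse)

theorem sweepFold (p : Int) (l : List Int) : ∀ (a b : List Int),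
    l.foldl (fun acc plate =>
      if PySem.Int.mod plate p != 0 then (acc.1 ++ [plate], acc.2)
      else (acc.1, acc.2 ++ [plate])) (a, b)
    = (a ++ l.filter (fun x => !(PySem.Int.mod x p == 0)),
       b ++ l.filter (fun x => PySem.Int.mod x p == 0)) := by
  induction l with
  | nil => simp
  | cons x t ih =>
    intro a b
    by_cases h : PySem.Int.mod x p = 0
    · have hstep : (if PySem.Int.mod x p != 0 then ((a, b).1 ++ [x], (a, b).2)
          else ((a, b).1, (a, b).2 ++ [x])) = (a, b ++ [x]) := by simp [h]
      rw [List.foldl_cons, hstep, ih]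
      simp [h]
    · have hstep : (if PySem.Int.mod x p != 0 then ((a, b).1 ++ [x], (a, b).2)
          else ((a, b).1, (a, b).2 ++ [x])) = (a ++ [x], b) := by simp [h]
      rw [List.foldl_cons, hstep, ih]
      simp [h]

theorem sweepA_eq (p : Int) (cur : List Int) :
    sweepA p cur = ((cur.filter (fun x => !(PySem.Int.mod x p == 0))).reverse,
                    (cur.filter (fun x => PySem.Int.mod x p == 0)).reverse) := by
  unfold sweepA
  rw [sweepFold]
  simp [List.filter_reverse]

theorem roundsA_out (k : Nat) : ∀ (ps : List Int) (num : Int) (cur : List Int),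
    (roundsA ps num k cur).1.foldl (fun res s => res ++ s.reverse) [] ++ (roundsA ps num k cur).2.reverse
      = specOut (takePrimes k ps num) cur := by
  induction k with
  | zero => intro ps num cur; simp [roundsA, takePrimes, specOut]
  | succ k ih =>
    intro ps num cur
    simp only [roundsA, takePrimes, specOut]
    have ih' := ih (primesNext ps num).2.1 (primesNext ps num).2.2 (sweepA (primesNext ps num).1 cur).1
    rw [PySem.List.foldl_append_eq_flatMap] at ih' ⊢
    simp only [sweepA_eq] at ih' ⊢
    simp only [List.nil_append, List.flatMap_cons, List.append_assoc] at ih' ⊢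
    rw [ih']
    simp

theorem waiter_eq_specOut (numbers : List Int) (q : Int) (hq : 0 < q) :
    waiter numbers q = specOut (takePrimes q.toNat [] 3) numbers := by
  have hk : ¬ q.toNat = 0 := by omega
  simp only [waiter, if_neg hk]
  exact roundsA_out q.toNat [] 3 numbers

theorem takePrimes_length (k : Nat) : ∀ (ps : List Int) (num : Int),
    (takePrimes k ps num).length = k := by
  induction k with
  | zero => intro ps num; simp [takePrimes]
  | succ k ih => intro ps num; simp [takePrimes, ih]

theorem keyLoop_eq (ps : List Int) (x : Int) : ∀ i, keyLoop ps x i = keyLoop ps x 0 + i := by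
  induction ps with
  | nil => intro i; simp [keyLoop]
  | cons p t ih =>
    intro i
    simp only [keyLoop]
    split
    · simp
    · rw [ih (i + 1), ih (0 + 1)]; ring

theorem keyLoop_nonneg (ps : List Int) (x : Int) : 0 ≤ keyLoop ps x 0 := by
  induction ps with
  | nil => simp [keyLoop]
  | cons p t ih =>
    simp only [keyLoop]
    split
    · omega
    · rw [keyLoop_eq]; omega

theorem keyLoop_cons (p : Int) (t : List Int) (x : Int) :
    keyLoop (p :: t) x 0 = if PySem.Int.mod x p == 0 then 0 else keyLoop t x 0 + 1 := by
  simp only [keyLoop]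
  split
  · rfl
  · rw [keyLoop_eq]; ring

theorem bucketsD (key : Int → Int) (numbers : List Int) (c : Int) :
    (numbers.foldl (fun d x => PySem.Dict.modify d (key x) [] (fun l => l ++ [x]))
        (PySem.Dict.empty : PySem.Dict Int (List Int))).getD c []
      = numbers.filter (fun x => key x == c) := by
  have h := PySem.Dict.getD_foldl_modify_append
    (l := numbers.map (fun x => (key x, x))) (d := (PySem.Dict.empty : PySem.Dict Int (List Int))) (c := c)
  rw [List.foldl_map] at h
  rw [h]
  simp [List.filter_map, Function.comp_def]

-- B in normal form: buckets replaced by filters, the emission loop by a flatMap over the range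
def emitB (ps : List Int) (cur : List Int) : List Int :=
  (PySem.List.pyRange 0 (ps.length : Int) 1).flatMap
      (fun i =>
        let s := cur.filter (fun x => keyLoop ps x 0 == i)
        if PySem.Int.mod i 2 == 0 then s else s.reverse) ++
    (let l := cur.filter (fun x => keyLoop ps x 0 == (ps.length : Int))
     if PySem.Int.mod (ps.length : Int) 2 == 1 then l else l.reverse)

theorem waiter_alt_eq_emitB (numbers : List Int) (q : Int) (hq : 0 ≤ q) :
    waiter_alt numbers q = emitB (takePrimes q.toNat [] 3) numbers := by
  have hq' : ((q.toNat : Nat) : Int) = q := Int.toNat_of_nonneg hq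
  simp only [waiter_alt, emitB, bucketsD, takePrimes_length, hq']
  rw [PySem.List.foldl_append_eq_flatMap]
  simp

theorem filt0 (p : Int) (t : List Int) (cur : List Int) :
    cur.filter (fun x => keyLoop (p :: t) x 0 == (0 : Int))
      = cur.filter (fun x => PySem.Int.mod x p == 0) := by
  apply List.filter_congr
  intro x _
  rw [keyLoop_cons, Bool.eq_iff_iff]
  have := keyLoop_nonneg t x
  by_cases h : PySem.Int.mod x p == 0 <;> simp [h, beq_iff_eq] <;> omega

theorem filtS (p : Int) (t : List Int) (cur : List Int) (j : Int) (hj : 0 ≤ j) :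
    cur.filter (fun x => keyLoop (p :: t) x 0 == j + 1)
      = (cur.filter (fun x => !(PySem.Int.mod x p == 0))).filter (fun x => keyLoop t x 0 == j) := by
  rw [List.filter_filter]
  apply List.filter_congr
  intro x _
  rw [keyLoop_cons, Bool.eq_iff_iff]
  by_cases h : PySem.Int.mod x p == 0 <;> simp [h, beq_iff_eq] <;> omega

-- parity flip: for a natural k, (1+k) even ↔ k odd, as the Bool tests the ports make

theorem parity_flip (k : Nat) :
    (PySem.Int.mod (1 + (k : Int)) 2 == 0) = !(PySem.Int.mod (k : Int) 2 == 0) := by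
  have h1 : (1 + (k : Int)) = ((1 + k : Nat) : Int) := by push_cast; ring
  rw [h1, Bool.eq_iff_iff]
  rcases Nat.mod_two_eq_zero_or_one k with h | h <;>
    simp [beq_iff_eq] <;> omega

theorem emitB_cons (p : Int) (t : List Int) (cur : List Int) :
    emitB (p :: t) cur
      = cur.filter (fun x => PySem.Int.mod x p == 0)
        ++ emitB t ((cur.filter (fun x => !(PySem.Int.mod x p == 0))).reverse) := by
  simp only [emitB]
  rw [PySem.List.pyRange_one_cons (by simp)]
  simp only [List.flatMap_cons]
  show cur.filter (fun x => keyLoop (p :: t) x 0 == (0:Int)) ++ _ ++ _ = _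
  rw [filt0, List.append_assoc]
  congr 1
  rw [PySem.List.pyRange_one, PySem.List.pyRange_one]
  congr 1
  · -- the buckets 1..q of the outer list are the buckets 0..q-1 of the reversed rest
    have hlen : ((((p :: t).length : Int)) - (0 + 1)).toNat = t.length := by simp
    have hlen' : (((t.length : Int)) - 0).toNat = t.length := by simp
    rw [hlen, hlen', List.flatMap_map, List.flatMap_map]
    apply List.flatMap_congr
    intro k _
    show (if PySem.Int.mod (0 + 1 + (k:Int)) 2 == 0 then _ else _) = _
    have h1 : (0 + 1 + (k:Int)) = 1 + (k:Int) := by ring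
    rw [h1]
    rw [show cur.filter (fun x => keyLoop (p :: t) x 0 == 1 + (k:Int))
          = cur.filter (fun x => keyLoop (p :: t) x 0 == (k:Int) + 1) by
        apply List.filter_congr; intro x _; rw [add_comm]]
    rw [filtS p t cur (k:Int) (by positivity), parity_flip k]
    show _ = (if PySem.Int.mod (0 + (k:Int)) 2 == 0 then _ else _)
    have h2 : (0 + (k:Int)) = (k:Int) := by ring
    rw [h2, List.filter_reverse]
    cases hb : (PySem.Int.mod (k:Int) 2 == 0) <;> simp
  · -- the leftover bucket
    have hlen : (((p :: t).length : Int)) = ((t.length : Int)) + 1 := by simp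
    rw [hlen, filtS p t cur ((t.length : Int)) (by positivity), List.filter_reverse]
    have hp : (PySem.Int.mod ((t.length : Int) + 1) 2 == 1) = !(PySem.Int.mod ((t.length : Int)) 2 == 1) := by
      have h1 : ((t.length : Int) + 1) = ((t.length + 1 : Nat) : Int) := by push_cast; ring
      rw [h1, Bool.eq_iff_iff]
      rcases Nat.mod_two_eq_zero_or_one t.length with h | h <;>
        simp [beq_iff_eq] <;> omega
    rw [hp]
    cases hb : (PySem.Int.mod ((t.length : Int)) 2 == 1) <;> simp

theorem emitB_nil (cur : List Int) : emitB [] cur = cur.reverse := by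
  simp [emitB, keyLoop, PySem.List.pyRange_one_eq_nil]

theorem emitB_eq_specOut (ps : List Int) : ∀ (cur : List Int), emitB ps cur = specOut ps cur := by
  induction ps with
  | nil => intro cur; rw [emitB_nil]; rfl
  | cons p t ih => intro cur; rw [emitB_cons, ih]; rfl

theorem waiter_alt_zero_ne_nil (numbers : List Int) (h : numbers ≠ []) : waiter_alt numbers 0 ≠ [] := by
  rw [waiter_alt_eq_emitB numbers 0 le_rfl]
  show emitB (takePrimes (0:Int).toNat [] 3) numbers ≠ []
  rw [show takePrimes (0:Int).toNat [] 3 = [] from rfl, emitB_nil]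
  simpa using h

theorem waiter_zero (numbers : List Int) : waiter numbers 0 = [] := by
  simp [waiter, roundsA]

-- ===== VERDICT (by name: the statement is the Claim_ definition above) =====
theorem waiter_spec : Claim_unchanged_waiter := by
  intro numbers q _ hpre hnd
  show waiter numbers q = waiter_alt numbers q
  rcases lt_or_eq_of_le (hpre : (0:Int) ≤ q) with hq | hq
  · rw [waiter_eq_specOut numbers q hq, waiter_alt_eq_emitB numbers q (le_of_lt hq),
      emitB_eq_specOut]
  · subst hq
    have hnil : numbers = [] := by
      by_contra h
      exact hnd ⟨rfl, h⟩
    subst hnil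
    decide

theorem waiter_changed : Claim_changed_waiter := by
  unfold Claim_changed_waiter; decide

theorem waiter_tight : Claim_exact_waiter := by
  intro numbers q _ _ hd
  obtain ⟨hq, hne⟩ := hd
  subst hq
  rw [waiter_zero]
  exact fun h => waiter_alt_zero_ne_nil numbers hne h.symm
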